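-- pv_equiv track=rewrite | github.com/SahilJat/repo-ai-review | ingestion/etl.py | clean_and_chunk
-- ===== SOURCE A (Python) =====
-- def clean_and_chunk(raw_text: str, chunk_size: int = 1500, overlap: int = 200) -> list[str]:
--     """Cleans junk data and splits massive diffs into overlapping windows."""
--     if not raw_text:
--         return []
--
--     cleaned_lines = []
--     skip = False
--     for line in raw_text.split('\n'):
--         if line.startswith('diff --git'):
--             skip = any(ext in line for ext in ['.lock', '.png', '.svg', '.min.js'])
--         if not skip and line.strip():
--             cleaned_lines.append(line.strip())
--
--     clean_text = '\n'.join(cleaned_lines)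
--
--     chunks = []
--     start = 0
--     while start < len(clean_text):
--         end = start + chunk_size
--         chunks.append(clean_text[start:end])
--         start += (chunk_size - overlap)
--     return chunks
-- ===== SOURCE B (Python) =====
-- def _is_header(line):
--     return line.startswith('diff --git')
--
--
-- def _skip_ext(line):
--     return any(ext in line for ext in ['.lock', '.png', '.svg', '.min.js'])
--
--
-- def _clean_sections(lines):
--     """Consume the lines section by section: a 'diff --git' header owns every
--     line up to the next header; a skipped section is dropped wholesale."""
--     out = []
--     i = 0
--     n = len(lines)
--     while i < n:
--         head = lines[i]
--         if _is_header(head):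
--             j = i + 1
--             while j < n and not _is_header(lines[j]):
--                 j += 1
--             if not _skip_ext(head):
--                 out.extend(s for s in (l.strip() for l in lines[i:j]) if s)
--             i = j
--         else:
--             s = head.strip()
--             if s:
--                 out.append(s)
--             i += 1
--     return out
--
--
-- def clean_and_chunk(raw_text: str, chunk_size: int = 1500, overlap: int = 200) -> list[str]:
--     if not raw_text:
--         return []
--     clean_text = '\n'.join(_clean_sections(raw_text.split('\n')))
--     chunks = []
--     start = 0
--     while start < len(clean_text):
--         chunks.append(clean_text[start:start + chunk_size])
--         start += (chunk_size - overlap)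
--     return chunks
-- ===== Notes on version B (the rewrite author's own statement) =====
-- stated objective: alternative
-- what changed: B replaces A's line-by-line loop with a carried boolean skip flag by a section-wise sweep: each 'diff --git' header consumes its whole section up to the next header at once and a skipped section is dropped wholesale, with no skip state; the sliding-window chunker is kept as the same while loop.
import Mathlib
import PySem

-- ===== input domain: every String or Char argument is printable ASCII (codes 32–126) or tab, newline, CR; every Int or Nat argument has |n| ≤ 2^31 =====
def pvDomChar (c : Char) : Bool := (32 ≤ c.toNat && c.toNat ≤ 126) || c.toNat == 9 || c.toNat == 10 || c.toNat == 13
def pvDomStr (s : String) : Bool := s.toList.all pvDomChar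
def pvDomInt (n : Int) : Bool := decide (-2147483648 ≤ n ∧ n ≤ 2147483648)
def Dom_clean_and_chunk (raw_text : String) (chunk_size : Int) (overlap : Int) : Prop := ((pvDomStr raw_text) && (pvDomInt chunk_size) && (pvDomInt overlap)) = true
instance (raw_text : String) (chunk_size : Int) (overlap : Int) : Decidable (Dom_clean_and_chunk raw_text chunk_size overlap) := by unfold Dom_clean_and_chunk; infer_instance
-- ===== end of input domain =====

-- B replaces A's boolean skip-flag line loop by a section-wise sweep (each 'diff --git'
-- header owns its lines up to the next header; skipped sections are dropped wholesale);
-- the sliding-window chunker is unchanged. Objective: alternative decomposition, same cost.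

-- shared helpers: both Pythons contain these exact expressions
-- line.startswith('diff --git')
def pvHeader (l : List Char) : Bool := PySem.Chars.startswith l "diff --git".toList
-- any(ext in line for ext in ['.lock', '.png', '.svg', '.min.js'])
def pvSkipExt (l : List Char) : Bool :=
  [".lock", ".png", ".svg", ".min.js"].any (fun e => PySem.Chars.isIn e.toList l)
-- the identical while-loop chunker of A and B: while start < len: append text[start:start+cs]; start += cs-ov
-- (the 0 < cs - ov guard only makes the recursion total: Python diverges there)
def pvChunkLoop (text : List Char) (chunk_size overlap : Int) (start : Int) : List String :=
  if _h : start < (text.length : Int) ∧ 0 < chunk_size - overlap then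
    String.ofList (PySem.List.slice text (some start) (some (start + chunk_size))) ::
      pvChunkLoop text chunk_size overlap (start + (chunk_size - overlap))
  else []
termination_by ((text.length : Int) - start).toNat
decreasing_by omega

-- ===== PORT A =====
-- A's cleaning loop: for line in lines, update skip on a header, keep line.strip() if nonempty and not skip
def pvCleanA : List (List Char) → Bool → List (List Char)
  | [], _ => []
  | l :: ls, skip =>
    let skip' := if pvHeader l then pvSkipExt l else skip
    if !skip' && !(PySem.Chars.strip l).isEmpty
    then PySem.Chars.strip l :: pvCleanA ls skip'
    else pvCleanA ls skip'

def clean_and_chunk (raw_text : String) (chunk_size : Int) (overlap : Int) : List String :=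
  if raw_text = "" then []
  else
    let cleaned_lines := pvCleanA (PySem.Chars.splitOn raw_text.toList ['\n']) false
    let clean_text := PySem.Chars.join ['\n'] cleaned_lines
    pvChunkLoop clean_text chunk_size overlap 0

-- ===== PORT B =====
-- B's section sweep (_clean_sections): a non-header line is handled alone; a header line
-- takes its whole section 'head :: body' (lines[i:j]) at once and drops it if _skip_ext(head)
def pvCleanB (lines : List (List Char)) : List (List Char) :=
  match lines with
  | [] => []
  | l :: ls =>
    if pvHeader l then
      let body := ls.takeWhile (fun x => !pvHeader x)
      let rest := ls.dropWhile (fun x => !pvHeader x)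
      if pvSkipExt l then pvCleanB rest
      else ((l :: body).map PySem.Chars.strip).filter (fun s => !s.isEmpty) ++ pvCleanB rest
    else
      (if !(PySem.Chars.strip l).isEmpty then [PySem.Chars.strip l] else []) ++ pvCleanB ls
termination_by lines.length
decreasing_by
  · have := List.length_dropWhile_le (fun x => !pvHeader x) ls; simp; omega
  · have := List.length_dropWhile_le (fun x => !pvHeader x) ls; simp; omega
  · simp

def clean_and_chunk_alt (raw_text : String) (chunk_size : Int) (overlap : Int) : List String :=
  if raw_text = "" then []
  else
    let clean_text := PySem.Chars.join ['\n'] (pvCleanB (PySem.Chars.splitOn raw_text.toList ['\n']))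
    pvChunkLoop clean_text chunk_size overlap 0

-- ===== PRECONDITION & SPEC =====
-- no Pre_: the ports agree on every input (where Python diverges, overlap >= chunk_size
-- with nonempty cleaned text, BOTH Pythons loop identically; the guarded Lean loops agree too)
def Spec_clean_and_chunk (raw_text : String) (chunk_size : Int) (overlap : Int) (out : List String) : Prop := out = clean_and_chunk_alt raw_text chunk_size overlap
instance (raw_text : String) (chunk_size : Int) (overlap : Int) (out : List String) : Decidable (Spec_clean_and_chunk raw_text chunk_size overlap out) := by unfold Spec_clean_and_chunk; infer_instance

-- ===== CLAIM (what is proved, stated in full; the proofs are below) =====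
def Claim_equal_clean_and_chunk : Prop := ∀ (raw_text : String) (chunk_size : Int) (overlap : Int), Dom_clean_and_chunk raw_text chunk_size overlap → Spec_clean_and_chunk raw_text chunk_size overlap (clean_and_chunk raw_text chunk_size overlap)

-- ===== LEMMAS AND PROOFS =====

-- A's loop over a run of non-header lines: the skip flag is constant; if it is set the run
-- contributes nothing, otherwise exactly its stripped nonempty lines.
theorem pvCleanA_nonheader_append (body : List (List Char)) (rest : List (List Char))
    (skip : Bool) (hb : ∀ l ∈ body, pvHeader l = false) :
    pvCleanA (body ++ rest) skip =
      (if skip then [] else (body.map PySem.Chars.strip).filter (fun s => !s.isEmpty))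
        ++ pvCleanA rest skip := by
  induction body with
  | nil => cases skip <;> simp
  | cons l ls ih =>
    have hl : pvHeader l = false := hb l (by simp)
    have ih' := ih (fun x hx => hb x (by simp [hx]))
    cases skip <;> simp only [List.cons_append, pvCleanA, hl] at * <;>
      [skip; (simp [ih'])]
    · by_cases he : (PySem.Chars.strip l).isEmpty <;> simp [he, ih']

-- the skip flag entering a list that is empty or starts with a header is irrelevant
theorem pvCleanA_skip_irrel (rest : List (List Char))
    (h : rest = [] ∨ ∃ r rs, rest = r :: rs ∧ pvHeader r = true) (s s' : Bool) :
    pvCleanA rest s = pvCleanA rest s' := by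
  rcases h with h | ⟨r, rs, rfl, hr⟩
  · subst h; rfl
  · simp [pvCleanA, hr]

theorem pvCleanA_eq_pvCleanB (lines : List (List Char)) :
    pvCleanA lines false = pvCleanB lines := by
  induction lines using pvCleanB.induct with
  | case1 => simp [pvCleanA, pvCleanB]
  | case2 l ls hl rst hskip ih =>
    have ih' : pvCleanA (ls.dropWhile (fun x => !pvHeader x)) false
        = pvCleanB (ls.dropWhile (fun x => !pvHeader x)) := ih
    -- skipped header section: A runs over it with skip = true, contributing nothing
    have hbody : ∀ x ∈ ls.takeWhile (fun x => !pvHeader x), pvHeader x = false := fun x hx => by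
      have := List.mem_takeWhile_imp hx; simpa using this
    have hrest : ls.dropWhile (fun x => !pvHeader x) = [] ∨
        ∃ r rs, ls.dropWhile (fun x => !pvHeader x) = r :: rs ∧ pvHeader r = true := by
      cases hr : ls.dropWhile (fun x => !pvHeader x) with
      | nil => exact Or.inl rfl
      | cons r rs =>
        refine Or.inr ⟨r, rs, rfl, ?_⟩
        have h2 := List.head?_dropWhile_not (fun x => !pvHeader x) ls
        rw [hr] at h2; simpa using h2
    calc pvCleanA (l :: ls) false
        = pvCleanA ls true := by simp [pvCleanA, hl, hskip]
      _ = pvCleanA (ls.dropWhile (fun x => !pvHeader x)) true := by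
          conv_lhs => rw [← List.takeWhile_append_dropWhile (p := fun x => !pvHeader x) (l := ls)]
          rw [pvCleanA_nonheader_append _ _ true hbody]; simp
      _ = pvCleanA (ls.dropWhile (fun x => !pvHeader x)) false :=
          pvCleanA_skip_irrel _ hrest true false
      _ = pvCleanB (l :: ls) := by rw [ih']; simp [pvCleanB, hl, hskip]
  | case3 l ls hl rst hskip ih =>
    have ih' : pvCleanA (ls.dropWhile (fun x => !pvHeader x)) false
        = pvCleanB (ls.dropWhile (fun x => !pvHeader x)) := ih
    -- kept header section: header and body lines are filtered exactly as A keeps them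
    have hskip' : pvSkipExt l = false := by simpa using hskip
    have hbody : ∀ x ∈ ls.takeWhile (fun x => !pvHeader x), pvHeader x = false := fun x hx => by
      have := List.mem_takeWhile_imp hx; simpa using this
    have hrest : ls.dropWhile (fun x => !pvHeader x) = [] ∨
        ∃ r rs, ls.dropWhile (fun x => !pvHeader x) = r :: rs ∧ pvHeader r = true := by
      cases hr : ls.dropWhile (fun x => !pvHeader x) with
      | nil => exact Or.inl rfl
      | cons r rs =>
        refine Or.inr ⟨r, rs, rfl, ?_⟩
        have h2 := List.head?_dropWhile_not (fun x => !pvHeader x) ls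
        rw [hr] at h2; simpa using h2
    have hA : pvCleanA (l :: ls) false =
        (if !(PySem.Chars.strip l).isEmpty then [PySem.Chars.strip l] else [])
          ++ pvCleanA ls false := by
      by_cases he : (PySem.Chars.strip l).isEmpty <;> simp [pvCleanA, hl, hskip', he]
    have hals : pvCleanA ls false =
        ((ls.takeWhile (fun x => !pvHeader x)).map PySem.Chars.strip).filter
            (fun s => !s.isEmpty)
          ++ pvCleanA (ls.dropWhile (fun x => !pvHeader x)) false := by
      conv_lhs => rw [← List.takeWhile_append_dropWhile (p := fun x => !pvHeader x) (l := ls)]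
      rw [pvCleanA_nonheader_append _ _ false hbody]; simp
    rw [hA, hals, pvCleanA_skip_irrel _ hrest false false, ih']
    simp only [pvCleanB, hl, if_true, hskip', Bool.false_eq_true, if_false]
    by_cases he : (PySem.Chars.strip l).isEmpty <;> simp [he]
  | case4 l ls hl ih =>
    -- non-header line outside any kept/skipped decision: skip stays false
    have hl' : pvHeader l = false := by simpa using hl
    have hA : pvCleanA (l :: ls) false =
        (if !(PySem.Chars.strip l).isEmpty then [PySem.Chars.strip l] else [])
          ++ pvCleanA ls false := by
      by_cases he : (PySem.Chars.strip l).isEmpty <;> simp [pvCleanA, hl', he]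
    rw [hA, ih]; simp [pvCleanB, hl']

-- ===== VERDICT (by name: the statement is the Claim_ definition above) =====
theorem clean_and_chunk_spec : Claim_equal_clean_and_chunk := by
  intro raw_text chunk_size overlap _
  unfold Spec_clean_and_chunk clean_and_chunk clean_and_chunk_alt
  by_cases h : raw_text = "" <;> simp [h, pvCleanA_eq_pvCleanB]
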